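-- pv_equiv track=rewrite | github.com/jcolinpatrick/kryptos | scripts/grille/e_k123_instruction.py | double_rotation_padded
-- ===== SOURCE A (Python) =====
-- import math
--
-- def double_rotation_padded(w1, w2, length):
--     """
--     K3-style double rotation for non-rectangular grids.
--     Step 1: write into w1-wide grid row by row, read columns top-to-bottom
--     Step 2: write into w2-wide grid row by row, read columns top-to-bottom
--     Uses only real positions (skips padding).
--     """
--     # First columnar transposition
--     h1 = math.ceil(length / w1)
--     perm1 = []
--     for col in range(w1):
--         for row in range(h1):
--             pos = row * w1 + col
--             if pos < length:
--                 perm1.append(pos)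
--     if len(perm1) != length or len(set(perm1)) != length:
--         return None
--
--     # Second columnar transposition (applied to result of first)
--     h2 = math.ceil(length / w2)
--     perm2 = []
--     for col in range(w2):
--         for row in range(h2):
--             pos = row * w2 + col
--             if pos < length:
--                 perm2.append(pos)
--     if len(perm2) != length or len(set(perm2)) != length:
--         return None
--
--     # Compose: result[i] = perm1[perm2[i]]
--     composed = [perm1[p] for p in perm2]
--     if len(set(composed)) != length:
--         return None
--     return composed
-- ===== SOURCE B (Python) =====
-- def _pos(i, w, length):
--     """Value at index i of the columnar read for width w, in closed form:
--     the first `full` columns hold h entries, the rest h-1."""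
--     h = -(-length // w)
--     full = length - (h - 1) * w
--     if i < full * h:
--         c, r = divmod(i, h)
--     else:
--         c2, r = divmod(i - full * h, h - 1)
--         c = full + c2
--     return r * w + c
--
--
-- def double_rotation_padded(w1, w2, length):
--     if length < 0 or (w1 <= 0 < length) or (w2 <= 0 < length):
--         return None
--     return [_pos(_pos(i, w2, length), w1, length) for i in range(length)]
-- ===== Notes on version B (the rewrite author's own statement) =====
-- stated objective: alternative
-- what changed: B never materialises the two column-read permutation lists: each output element is computed by a closed-form index formula (full-height columns first, one divmod recovers column and row) applied twice, replacing A's nested grid scans, list composition by indexing and set-based guards.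
import Mathlib
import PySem

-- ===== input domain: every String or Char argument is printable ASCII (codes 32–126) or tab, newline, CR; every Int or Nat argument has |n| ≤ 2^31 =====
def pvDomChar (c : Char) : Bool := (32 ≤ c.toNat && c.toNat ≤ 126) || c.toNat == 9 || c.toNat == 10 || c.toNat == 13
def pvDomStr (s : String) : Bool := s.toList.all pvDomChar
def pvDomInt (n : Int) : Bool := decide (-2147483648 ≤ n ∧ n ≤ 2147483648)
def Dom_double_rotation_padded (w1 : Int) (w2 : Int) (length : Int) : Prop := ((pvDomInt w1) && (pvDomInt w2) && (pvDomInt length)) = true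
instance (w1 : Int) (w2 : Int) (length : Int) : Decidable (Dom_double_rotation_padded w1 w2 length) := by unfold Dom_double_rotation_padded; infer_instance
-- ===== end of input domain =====

-- B computes each output element by a closed-form index formula (full-height columns first,
-- one divmod per lookup) applied twice, instead of materialising the two column-read
-- permutation lists and composing them with list indexing and set-based guards
-- (objective: alternative; return value only, no mutation).

-- ===== PORT A =====
-- math.ceil(length / w): Python evaluates a true (float) division and ceils it; on the domain
-- |length|,|w| ≤ 2^31 the correctly-rounded float quotient never crosses an integer, so this is
-- exactly the integer ceiling ⌈length/w⌉ = -((-length) // w).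
def pyCeilDiv (a : Int) (b : Int) : Int := -(PySem.Int.floordiv (-a) b)

def double_rotation_padded (w1 : Int) (w2 : Int) (length : Int) : Option (List Int) :=
  let h1 := pyCeilDiv length w1
  let perm1 := (PySem.List.pyRange 0 w1 1).foldl (fun acc col =>
      (PySem.List.pyRange 0 h1 1).foldl (fun acc2 row =>
        if row * w1 + col < length then acc2 ++ [row * w1 + col] else acc2) acc) []
  if (perm1.length : Int) ≠ length ∨ ((PySem.Set.ofList perm1).length : Int) ≠ length then none
  else
    let h2 := pyCeilDiv length w2
    let perm2 := (PySem.List.pyRange 0 w2 1).foldl (fun acc col =>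
        (PySem.List.pyRange 0 h2 1).foldl (fun acc2 row =>
          if row * w2 + col < length then acc2 ++ [row * w2 + col] else acc2) acc) []
    if (perm2.length : Int) ≠ length ∨ ((PySem.Set.ofList perm2).length : Int) ≠ length then none
    else
      match perm2.mapM (fun p => PySem.List.pyGet? perm1 p) with
      | none => none   -- IndexError in the comprehension (never reached once both guards passed)
      | some composed =>
        if ((PySem.Set.ofList composed).length : Int) ≠ length then none
        else some composed

-- ===== PORT B =====
-- _pos from Source B: h = -(-length // w); full = length - (h-1)*w; one divmod picks column and row.
def posIdx (i : Int) (w : Int) (length : Int) : Int :=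
  let h := -(PySem.Int.floordiv (-length) w)
  let full := length - (h - 1) * w
  if i < full * h then
    PySem.Int.mod i h * w + PySem.Int.floordiv i h
  else
    PySem.Int.mod (i - full * h) (h - 1) * w
      + (full + PySem.Int.floordiv (i - full * h) (h - 1))

def double_rotation_padded_alt (w1 : Int) (w2 : Int) (length : Int) : Option (List Int) :=
  if length < 0 ∨ (w1 ≤ 0 ∧ 0 < length) ∨ (w2 ≤ 0 ∧ 0 < length) then none
  else some ((PySem.List.pyRange 0 length 1).map
    (fun i => posIdx (posIdx i w2 length) w1 length))

-- ===== PRECONDITION & SPEC =====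
-- Pre_ excludes exactly the inputs where Python A raises ZeroDivisionError: w1 = 0, or w2 = 0 on
-- the inputs where the first columnar guard passes (w1 > 0 with length ≥ 0, or length = 0).
def Pre_double_rotation_padded (w1 : Int) (w2 : Int) (length : Int) : Prop :=
  w1 ≠ 0 ∧ (((0 < w1 ∧ 0 ≤ length) ∨ length = 0) → w2 ≠ 0)
instance (w1 : Int) (w2 : Int) (length : Int) : Decidable (Pre_double_rotation_padded w1 w2 length) := by unfold Pre_double_rotation_padded; infer_instance
def pvWitness_double_rotation_padded : Int × Int × Int := (3, 2, 7)

def Spec_double_rotation_padded (w1 : Int) (w2 : Int) (length : Int) (out : Option (List Int)) : Prop := out = double_rotation_padded_alt w1 w2 length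
instance (w1 : Int) (w2 : Int) (length : Int) (out : Option (List Int)) : Decidable (Spec_double_rotation_padded w1 w2 length out) := by unfold Spec_double_rotation_padded; infer_instance

-- ===== CLAIM (what is proved, stated in full; the proofs are below) =====
def Claim_equal_double_rotation_padded : Prop := ∀ (w1 : Int) (w2 : Int) (length : Int), Dom_double_rotation_padded w1 w2 length → Pre_double_rotation_padded w1 w2 length → Spec_double_rotation_padded w1 w2 length (double_rotation_padded w1 w2 length)


-- ===== LEMMAS AND PROOFS =====

-- A's nested loops for one width, as a standalone function of (width, height, length).
def gridRead (w : Int) (h : Int) (length : Int) : List Int :=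
  (PySem.List.pyRange 0 w 1).foldl (fun acc col =>
    (PySem.List.pyRange 0 h 1).foldl (fun acc2 row =>
      if row * w + col < length then acc2 ++ [row * w + col] else acc2) acc) []

-- The common normal form: the positions below `length`, concatenated column class by column class.
def colConcat (w : Int) (length : Int) : List Int :=
  (PySem.List.pyRange 0 w 1).flatMap (fun c =>
    (PySem.List.pyRange 0 length 1).filter (fun p => PySem.Int.mod p w == c))

-- number of full-height columns, length and start offset of column c
def fullCols (w : Int) (L : Int) : Int := L - (pyCeilDiv L w - 1) * w
def colLen (w : Int) (L : Int) (c : Int) : Int :=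
  if c < fullCols w L then pyCeilDiv L w else pyCeilDiv L w - 1
def colStart (w : Int) (L : Int) (c : Int) : Int :=
  c * (pyCeilDiv L w - 1) + min c (fullCols w L)
def colList (w : Int) (L : Int) (c : Int) : List Int :=
  (PySem.List.pyRange 0 (colLen w L c) 1).map (fun r => r * w + c)

theorem A_as_gridRead (w1 : Int) (w2 : Int) (L : Int) :
    double_rotation_padded w1 w2 L =
      (let perm1 := gridRead w1 (pyCeilDiv L w1) L
       if (perm1.length : Int) ≠ L ∨ ((PySem.Set.ofList perm1).length : Int) ≠ L then none
       else
         let perm2 := gridRead w2 (pyCeilDiv L w2) L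
         if (perm2.length : Int) ≠ L ∨ ((PySem.Set.ofList perm2).length : Int) ≠ L then none
         else
           match perm2.mapM (fun p => PySem.List.pyGet? perm1 p) with
           | none => none
           | some composed =>
             if ((PySem.Set.ofList composed).length : Int) ≠ L then none
             else some composed) := rfl

theorem ceil_bounds (L : Int) (w : Int) (hw : 0 < w) :
    (pyCeilDiv L w - 1) * w < L ∧ L ≤ pyCeilDiv L w * w :=
  (PySem.Int.neg_floordiv_neg_eq_iff_of_pos hw).mp rfl

theorem ceil_nonpos (L : Int) (w : Int) (hw : 0 < w) (hL : L ≤ 0) : pyCeilDiv L w ≤ 0 := by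
  have hb := ceil_bounds L w hw
  nlinarith [hb.1, hb.2]

theorem ceil_pos (L : Int) (w : Int) (hw : 0 < w) (hL : 0 < L) : 1 ≤ pyCeilDiv L w := by
  have hb := ceil_bounds L w hw
  nlinarith [hb.1, hb.2]

theorem fullCols_bounds (w : Int) (L : Int) (hw : 0 < w) :
    0 < fullCols w L ∧ fullCols w L ≤ w := by
  have hb := ceil_bounds L w hw
  unfold fullCols
  constructor <;> nlinarith [hb.1, hb.2]

theorem gridRead_flat (w : Int) (h : Int) (length : Int) :
    gridRead w h length = (PySem.List.pyRange 0 w 1).flatMap (fun c =>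
      ((PySem.List.pyRange 0 h 1).filter (fun r => decide (r * w + c < length))).map
        (fun r => r * w + c)) := by
  unfold gridRead
  simp only [PySem.List.foldl_append_ite, PySem.List.foldl_append_eq_flatMap, List.nil_append]

theorem gridRead_nil_w (w : Int) (h : Int) (length : Int) (hw : w ≤ 0) :
    gridRead w h length = [] := by
  unfold gridRead
  rw [PySem.List.pyRange_one_eq_nil hw]
  rfl

theorem gridRead_nil_h (w : Int) (h : Int) (length : Int) (hh : h ≤ 0) :
    gridRead w h length = [] := by
  rw [gridRead_flat, PySem.List.pyRange_one_eq_nil hh]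
  simp

theorem col_eq (w : Int) (L : Int) (c : Int) (hw : 0 < w) (hc : 0 ≤ c) (hcw : c < w) :
    ((PySem.List.pyRange 0 (pyCeilDiv L w) 1).filter (fun r => decide (r * w + c < L))).map
      (fun r => r * w + c)
    = (PySem.List.pyRange 0 L 1).filter (fun p => PySem.Int.mod p w == c) := by
  have hb := ceil_bounds L w hw
  apply PySem.List.eq_of_perm_of_pairwise_le_of_injective (key := fun x => x) (fun a b h => h)
  · rw [List.perm_ext_iff_of_nodup]
    · intro x
      simp only [List.mem_map, List.mem_filter, PySem.List.mem_pyRange_one, decide_eq_true_eq]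
      constructor
      · rintro ⟨r, ⟨⟨hr0, hrh⟩, hlt⟩, rfl⟩
        refine ⟨⟨by nlinarith, hlt⟩, ?_⟩
        rw [PySem.Int.mod_eq_emod_of_pos hw]
        have : (r * w + c) % w = c := by
          rw [Int.add_comm]; rw [Int.add_mul_emod_self_right]
          exact Int.emod_eq_of_lt hc hcw
        simp [this]
      · rintro ⟨⟨hx0, hxL⟩, hmod⟩
        rw [PySem.Int.mod_eq_emod_of_pos hw] at hmod
        have hmod' : x % w = c := of_decide_eq_true hmod
        have h1 := Int.emod_add_mul_ediv x w
        rw [hmod'] at h1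
        have hdecomp : x / w * w + c = x := by linarith [mul_comm w (x / w)]
        have hq0 : 0 ≤ x / w := Int.ediv_nonneg hx0 (le_of_lt hw)
        have hm : (x / w) * w < pyCeilDiv L w * w := by linarith [hb.2]
        exact ⟨x / w, ⟨⟨hq0, lt_of_mul_lt_mul_right hm (le_of_lt hw)⟩, by linarith⟩, hdecomp⟩
    · exact (List.nodup_map_iff
        (fun a b h => mul_right_cancel₀ (ne_of_gt hw) (by linarith : a * w = b * w))).mpr
        (List.Nodup.filter _ (PySem.List.nodup_pyRange_one 0 (pyCeilDiv L w)))
    · exact List.Nodup.filter _ (PySem.List.nodup_pyRange_one 0 L)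
  · exact ((List.Pairwise.filter _ (PySem.List.pairwise_lt_pyRange_one 0 (pyCeilDiv L w))).map _
      (fun a b h => by have := mul_lt_mul_of_pos_right h hw; linarith)).imp le_of_lt
  · exact (List.Pairwise.filter _ (PySem.List.pairwise_lt_pyRange_one 0 L)).imp le_of_lt

theorem colConcat_nodup (w : Int) (L : Int) (hw : 0 < w) : (colConcat w L).Nodup := by
  unfold colConcat
  rw [List.nodup_flatMap]
  constructor
  · exact fun c _ => List.Nodup.filter _ (PySem.List.nodup_pyRange_one 0 L)
  · refine (PySem.List.pairwise_lt_pyRange_one 0 w).imp ?_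
    intro c c' hlt
    intro x hx hx'
    simp only [List.mem_filter] at hx hx'
    have h1 : PySem.Int.mod x w = c := by simpa using hx.2
    have h2 : PySem.Int.mod x w = c' := by simpa using hx'.2
    omega

theorem colConcat_perm (w : Int) (L : Int) (hw : 0 < w) (hL : 0 ≤ L) :
    (colConcat w L).Perm (PySem.List.pyRange 0 L 1) := by
  rw [List.perm_ext_iff_of_nodup (colConcat_nodup w L hw) (PySem.List.nodup_pyRange_one 0 L)]
  intro x
  unfold colConcat
  simp only [List.mem_flatMap, List.mem_filter, PySem.List.mem_pyRange_one]
  constructor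
  · rintro ⟨c, _, hxr, _⟩
    exact hxr
  · intro hxr
    exact ⟨PySem.Int.mod x w,
      ⟨PySem.Int.mod_nonneg x hw, PySem.Int.mod_lt x hw⟩, hxr, by simp⟩

theorem colConcat_length (w : Int) (L : Int) (hw : 0 < w) (hL : 0 ≤ L) :
    ((colConcat w L).length : Int) = L := by
  rw [(colConcat_perm w L hw hL).length_eq, PySem.List.length_pyRange_one]
  omega

theorem mapM_pyGet (xs : List Int) (l : List Int)
    (h : ∀ p ∈ l, 0 ≤ p ∧ p < (xs.length : Int)) :
    l.mapM (fun p => PySem.List.pyGet? xs p)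
      = some (l.map (fun p => PySem.List.pyGetD xs p 0)) := by
  induction l with
  | nil => rfl
  | cons p t ih =>
    have hp := h p (by simp)
    have hg : PySem.List.pyGet? xs p = some (PySem.List.pyGetD xs p 0) := by
      rw [PySem.List.pyGet?_eq_some_getElem xs hp.1 hp.2,
        PySem.List.pyGetD_eq_getElem xs 0 hp.1 hp.2]
    rw [List.mapM_cons, ih (fun q hq => h q (by simp [hq])), hg]
    rfl

-- the filter over a full-height column keeps exactly the first colLen rows
theorem filter_range_eq (w : Int) (L : Int) (c : Int) (hw : 0 < w) (hL : 0 < L)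
    (hc : 0 ≤ c) (hcw : c < w) :
    (PySem.List.pyRange 0 (pyCeilDiv L w) 1).filter (fun r => decide (r * w + c < L))
      = PySem.List.pyRange 0 (colLen w L c) 1 := by
  have hb := ceil_bounds L w hw
  have hfc := fullCols_bounds w L hw
  have h1 := ceil_pos L w hw hL
  have hlen : 0 ≤ colLen w L c ∧ colLen w L c ≤ pyCeilDiv L w := by
    unfold colLen; split_ifs <;> omega
  rw [PySem.List.pyRange_one_append 0 (colLen w L c) (pyCeilDiv L w) hlen.1 hlen.2,
    List.filter_append]
  have hkeep : (PySem.List.pyRange 0 (colLen w L c) 1).filter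
      (fun r => decide (r * w + c < L)) = PySem.List.pyRange 0 (colLen w L c) 1 := by
    rw [List.filter_eq_self]
    intro r hr
    rw [PySem.List.mem_pyRange_one] at hr
    have : r * w + c < L := by
      unfold colLen fullCols at hr
      split_ifs at hr with hcf
      · unfold fullCols at hcf; nlinarith [hr.1, hr.2, hb.1]
      · unfold fullCols at hcf; nlinarith [hr.1, hr.2, hb.1]
    simpa using this
  have hdrop : (PySem.List.pyRange (colLen w L c) (pyCeilDiv L w) 1).filter
      (fun r => decide (r * w + c < L)) = [] := by
    rw [List.filter_eq_nil_iff]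
    intro r hr
    rw [PySem.List.mem_pyRange_one] at hr
    have : ¬ (r * w + c < L) := by
      unfold colLen fullCols at hr
      split_ifs at hr with hcf
      · unfold fullCols at hcf; nlinarith [hr.1, hr.2, hb.2]
      · unfold fullCols at hcf; nlinarith [hr.1, hr.2, hb.2]
    simpa using this
  rw [hkeep, hdrop, List.append_nil]

theorem colList_eq (w : Int) (L : Int) (c : Int) (hw : 0 < w) (hL : 0 < L)
    (hc : 0 ≤ c) (hcw : c < w) :
    colList w L c = (PySem.List.pyRange 0 L 1).filter (fun p => PySem.Int.mod p w == c) := by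
  rw [colList, ← filter_range_eq w L c hw hL hc hcw, col_eq w L c hw hc hcw]

-- the closed-form index formula inverts (column, row) ↦ start-of-column + row
theorem posIdx_closed (w : Int) (L : Int) (c : Int) (r : Int) (hw : 0 < w) (hL : 0 < L)
    (hc : 0 ≤ c) (hcw : c < w) (hr : 0 ≤ r) (hrn : r < colLen w L c) :
    posIdx (colStart w L c + r) w L = r * w + c := by
  have hb := ceil_bounds L w hw
  have hfc := fullCols_bounds w L hw
  have h1 := ceil_pos L w hw hL
  simp only [posIdx, colStart]
  have hpc : -(PySem.Int.floordiv (-L) w) = pyCeilDiv L w := rfl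
  rw [hpc]
  set h := pyCeilDiv L w with hh
  have hfull : L - (h - 1) * w = fullCols w L := by rw [hh]; rfl
  rw [hfull]
  set full := fullCols w L with hfl
  by_cases hcf : c < full
  · have hlen : colLen w L c = h := by
      unfold colLen; rw [if_pos (show c < fullCols w L from hcf), hh]
    rw [hlen] at hrn
    have hmin : min c full = c := by omega
    have hidx : c * (h - 1) + min c full + r = r + c * h := by rw [hmin]; ring
    have hlt : r + c * h < full * h := by
      nlinarith [mul_le_mul_of_nonneg_right (show c ≤ full - 1 by omega)
        (show (0:Int) ≤ h by omega)]
    rw [hidx, if_pos hlt]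
    rw [PySem.Int.mod_eq_emod_of_pos (by omega), PySem.Int.floordiv_eq_ediv_of_pos (by omega)]
    rw [Int.add_mul_emod_self_right, Int.emod_eq_of_lt hr hrn,
      Int.add_mul_ediv_right _ _ (by omega : h ≠ 0), Int.ediv_eq_zero_of_lt hr hrn]
    ring
  · have hlen : colLen w L c = h - 1 := by
      unfold colLen; rw [if_neg (show ¬ c < fullCols w L from hcf), hh]
    rw [hlen] at hrn
    have hh2 : 0 < h - 1 := by omega
    have hmin : min c full = full := by omega
    have hidx : c * (h - 1) + min c full + r = r + (c - full) * (h - 1) + full * h := by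
      rw [hmin]; ring
    have hge : ¬ (r + (c - full) * (h - 1) + full * h < full * h) := by
      nlinarith [mul_nonneg (show (0:Int) ≤ c - full by omega)
        (show (0:Int) ≤ h - 1 by omega)]
    rw [hidx, if_neg hge]
    rw [show r + (c - full) * (h - 1) + full * h - full * h = r + (c - full) * (h - 1) by ring]
    rw [PySem.Int.mod_eq_emod_of_pos hh2, PySem.Int.floordiv_eq_ediv_of_pos hh2]
    rw [Int.add_mul_emod_self_right, Int.emod_eq_of_lt hr hrn,
      Int.add_mul_ediv_right _ _ (by omega : h - 1 ≠ 0), Int.ediv_eq_zero_of_lt hr hrn]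
    ring

theorem colStart_succ (w : Int) (L : Int) (c : Int) :
    colStart w L (c + 1) = colStart w L c + colLen w L c := by
  unfold colStart colLen
  by_cases hcf : c < fullCols w L
  · rw [if_pos hcf, min_eq_left (by omega), min_eq_left (by omega)]; ring
  · rw [if_neg hcf, min_eq_right (by omega), min_eq_right (by omega)]; ring

theorem colStart_nonneg (w : Int) (L : Int) (c : Int) (hw : 0 < w) (hL : 0 < L) (hc : 0 ≤ c) :
    0 ≤ colStart w L c := by
  have h1 := ceil_pos L w hw hL
  have hfc := fullCols_bounds w L hw
  unfold colStart
  have ha : 0 ≤ c * (pyCeilDiv L w - 1) := mul_nonneg hc (by omega)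
  have hbm : 0 ≤ min c (fullCols w L) := le_min hc (by omega)
  linarith

theorem colStart_top (w : Int) (L : Int) (hw : 0 < w) :
    colStart w L w = L := by
  have hfc := fullCols_bounds w L hw
  unfold colStart
  have hmin : min w (fullCols w L) = fullCols w L := by omega
  rw [hmin]
  unfold fullCols
  ring

theorem colLen_nonneg (w : Int) (L : Int) (c : Int) (hw : 0 < w) (hL : 0 < L) :
    0 ≤ colLen w L c := by
  have h1 := ceil_pos L w hw hL
  unfold colLen; split_ifs <;> omega

-- one column of B's map equals colList
theorem map_posIdx_block (w : Int) (L : Int) (c : Int) (hw : 0 < w) (hL : 0 < L)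
    (hc : 0 ≤ c) (hcw : c < w) :
    (PySem.List.pyRange (colStart w L c) (colStart w L c + colLen w L c) 1).map
      (fun i => posIdx i w L) = colList w L c := by
  unfold colList
  rw [PySem.List.pyRange_one (colStart w L c) (colStart w L c + colLen w L c),
    PySem.List.pyRange_one 0 (colLen w L c)]
  rw [List.map_map, List.map_map,
    show colStart w L c + colLen w L c - colStart w L c = colLen w L c by ring, sub_zero]
  apply List.map_congr_left
  intro k hk
  rw [List.mem_range] at hk
  have hkb : (k : Int) < colLen w L c := by
    have h0 : 0 ≤ colLen w L c := colLen_nonneg w L c hw hL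
    omega
  simp only [Function.comp_apply, zero_add]
  exact posIdx_closed w L c (k : Int) hw hL hc hcw (Int.natCast_nonneg k) hkb

-- B's map over the first c columns' worth of indices is the first c columns
theorem map_posIdx_prefix (w : Int) (L : Int) (hw : 0 < w) (hL : 0 < L) :
    ∀ k : Nat, (k : Int) ≤ w →
      (PySem.List.pyRange 0 (colStart w L (k : Int)) 1).map (fun i => posIdx i w L)
        = (PySem.List.pyRange 0 (k : Int) 1).flatMap (colList w L) := by
  intro k
  induction k with
  | zero =>
    intro _
    have hfc := fullCols_bounds w L hw
    have hz : colStart w L ((0:Nat):Int) = 0 := by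
      unfold colStart; rw [Nat.cast_zero, min_eq_left (by omega)]; ring
    rw [hz, Nat.cast_zero]
    rfl
  | succ k ih =>
    intro hk
    have hk' : (k : Int) ≤ w := by push_cast at hk ⊢; omega
    have hkw : (k : Int) < w := by push_cast at hk; omega
    have hc0 : (0:Int) ≤ (k : Int) := Int.natCast_nonneg k
    have hs0 := colStart_nonneg w L (k : Int) hw hL hc0
    have hl0 := colLen_nonneg w L (k : Int) hw hL
    have hsplit : PySem.List.pyRange 0 (colStart w L ((k:Int) + 1)) 1
        = PySem.List.pyRange 0 (colStart w L (k:Int)) 1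
          ++ PySem.List.pyRange (colStart w L (k:Int))
              (colStart w L (k:Int) + colLen w L (k:Int)) 1 := by
      rw [colStart_succ w L (k:Int)]
      exact PySem.List.pyRange_one_append 0 (colStart w L (k:Int)) _ hs0 (by omega)
    have hcast : ((k + 1 : Nat) : Int) = (k : Int) + 1 := by push_cast; ring
    rw [hcast, hsplit, List.map_append, ih hk',
      PySem.List.pyRange_one_succ_right hc0, List.flatMap_append,
      map_posIdx_block w L (k:Int) hw hL hc0 hkw]
    simp [List.flatMap_cons]

-- KEY: the column-major read, in closed form per index
theorem colConcat_eq_map_posIdx (w : Int) (L : Int) (hw : 0 < w) (hL : 0 < L) :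
    colConcat w L = (PySem.List.pyRange 0 L 1).map (fun i => posIdx i w L) := by
  have hwn : ((w.toNat : Nat) : Int) = w := Int.toNat_of_nonneg (le_of_lt hw)
  have := map_posIdx_prefix w L hw hL w.toNat (by rw [hwn])
  rw [hwn, colStart_top w L hw] at this
  rw [this]
  unfold colConcat
  exact (List.flatMap_congr (fun c hc => by
    rw [PySem.List.mem_pyRange_one] at hc
    exact colList_eq w L c hw hL hc.1 hc.2)).symm

theorem gridRead_eq_colConcat (w : Int) (L : Int) (hw : 0 < w) :
    gridRead w (pyCeilDiv L w) L = colConcat w L := by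
  rw [gridRead_flat]
  unfold colConcat
  exact List.flatMap_congr (fun c hc => by
    rw [PySem.List.mem_pyRange_one] at hc
    exact col_eq w L c hw hc.1 hc.2)

theorem posIdx_mem (w : Int) (L : Int) (i : Int) (hw : 0 < w) (hL : 0 < L)
    (hi0 : 0 ≤ i) (hiL : i < L) : 0 ≤ posIdx i w L ∧ posIdx i w L < L := by
  have hmem : posIdx i w L ∈ colConcat w L := by
    rw [colConcat_eq_map_posIdx w L hw hL]
    exact List.mem_map_of_mem (by rw [PySem.List.mem_pyRange_one]; exact ⟨hi0, hiL⟩)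
  have := (colConcat_perm w L hw (le_of_lt hL)).mem_iff.mp hmem
  rwa [PySem.List.mem_pyRange_one] at this

-- ===== VERDICT (by name: the statement is the Claim_ definition above) =====
theorem double_rotation_padded_spec : Claim_equal_double_rotation_padded := by
  unfold Claim_equal_double_rotation_padded
  intro w1 w2 L hdom hpre
  unfold Spec_double_rotation_padded
  obtain ⟨hw1, hw2i⟩ := hpre
  rw [A_as_gridRead]
  simp only [double_rotation_padded_alt]
  by_cases hL0 : L < 0
  · have hnil : gridRead w1 (pyCeilDiv L w1) L = [] := by
      rcases lt_or_gt_of_ne hw1 with h | h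
      · exact gridRead_nil_w _ _ _ (le_of_lt h)
      · exact gridRead_nil_h _ _ _ (ceil_nonpos L w1 h (le_of_lt hL0))
    rw [hnil, if_pos (Or.inl hL0), if_pos (Or.inl (by simpa using (ne_of_lt hL0).symm))]
  · push_neg at hL0
    by_cases hLz : L = 0
    · subst hLz
      have hnil1 : gridRead w1 (pyCeilDiv 0 w1) 0 = [] := by
        rcases lt_or_gt_of_ne hw1 with h | h
        · exact gridRead_nil_w _ _ _ (le_of_lt h)
        · exact gridRead_nil_h _ _ _ (ceil_nonpos 0 w1 h le_rfl)
      have hw2 : w2 ≠ 0 := hw2i (Or.inr rfl)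
      have hnil2 : gridRead w2 (pyCeilDiv 0 w2) 0 = [] := by
        rcases lt_or_gt_of_ne hw2 with h | h
        · exact gridRead_nil_w _ _ _ (le_of_lt h)
        · exact gridRead_nil_h _ _ _ (ceil_nonpos 0 w2 h le_rfl)
      rw [hnil1, hnil2, PySem.List.pyRange_one_eq_nil (le_refl (0:Int))]
      norm_num
    · have hLpos : 0 < L := by omega
      rcases lt_or_gt_of_ne hw1 with hw1n | hw1p
      · rw [gridRead_nil_w _ _ _ (le_of_lt hw1n),
          if_pos (Or.inl (by simpa using (ne_of_gt hLpos).symm)),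
          if_pos (Or.inr (Or.inl ⟨le_of_lt hw1n, hLpos⟩))]
      · have hw2 : w2 ≠ 0 := hw2i (Or.inl ⟨hw1p, hL0⟩)
        have hperm1 : gridRead w1 (pyCeilDiv L w1) L = colConcat w1 L :=
          gridRead_eq_colConcat w1 L hw1p
        have hlen1 := colConcat_length w1 L hw1p hL0
        have hofl1 : PySem.Set.ofList (colConcat w1 L) = colConcat w1 L :=
          PySem.Set.ofList_eq_self_of_nodup _ (colConcat_nodup w1 L hw1p)
        have hg1 : ¬ (((colConcat w1 L).length : Int) ≠ L
            ∨ ((PySem.Set.ofList (colConcat w1 L)).length : Int) ≠ L) := by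
          rw [hofl1]
          push_neg
          exact ⟨hlen1, hlen1⟩
        have hB1 : ¬ (L < 0 ∨ (w1 ≤ 0 ∧ 0 < L) ∨ (w2 ≤ 0 ∧ 0 < L)) → True := fun _ => trivial
        rcases lt_or_gt_of_ne hw2 with hw2n | hw2p
        · rw [hperm1, if_neg hg1, gridRead_nil_w _ _ _ (le_of_lt hw2n),
            if_pos (Or.inl (by simpa using (ne_of_gt hLpos).symm)),
            if_pos (Or.inr (Or.inr ⟨le_of_lt hw2n, hLpos⟩))]
        · have hperm2 : gridRead w2 (pyCeilDiv L w2) L = colConcat w2 L :=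
            gridRead_eq_colConcat w2 L hw2p
          have hlen2 := colConcat_length w2 L hw2p hL0
          have hofl2 : PySem.Set.ofList (colConcat w2 L) = colConcat w2 L :=
            PySem.Set.ofList_eq_self_of_nodup _ (colConcat_nodup w2 L hw2p)
          have hg2 : ¬ (((colConcat w2 L).length : Int) ≠ L
              ∨ ((PySem.Set.ofList (colConcat w2 L)).length : Int) ≠ L) := by
            rw [hofl2]
            push_neg
            exact ⟨hlen2, hlen2⟩
          have hBn : ¬ (L < 0 ∨ (w1 ≤ 0 ∧ 0 < L) ∨ (w2 ≤ 0 ∧ 0 < L)) := by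
            push_neg
            exact ⟨hL0, fun h => absurd hw1p (by omega), fun h => absurd hw2p (by omega)⟩
          have hmapM : (colConcat w2 L).mapM (fun p => PySem.List.pyGet? (colConcat w1 L) p)
              = some ((colConcat w2 L).map
                  (fun p => PySem.List.pyGetD (colConcat w1 L) p 0)) := by
            apply mapM_pyGet
            intro p hp
            have hp' := (colConcat_perm w2 L hw2p hL0).mem_iff.mp hp
            rw [PySem.List.mem_pyRange_one] at hp'
            rw [hlen1]
            exact hp'
          -- the composed list, elementwise
          have hcomp : (colConcat w2 L).map (fun p => PySem.List.pyGetD (colConcat w1 L) p 0)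
              = (PySem.List.pyRange 0 L 1).map (fun i => posIdx (posIdx i w2 L) w1 L) := by
            rw [colConcat_eq_map_posIdx w2 L hw2p hLpos, List.map_map]
            apply List.map_congr_left
            intro i hi
            rw [PySem.List.mem_pyRange_one] at hi
            have hpb := posIdx_mem w2 L i hw2p hLpos hi.1 hi.2
            simp only [Function.comp_apply]
            rw [colConcat_eq_map_posIdx w1 L hw1p hLpos,
              PySem.List.pyGetD_map_pyRange_of_nonneg _ _ _ _ hpb.1 hpb.2]
          have hcperm : ((colConcat w2 L).map
              (fun p => PySem.List.pyGetD (colConcat w1 L) p 0)).Perm (colConcat w1 L) := by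
            have h1 := (colConcat_perm w2 L hw2p hL0).map
              (fun p => PySem.List.pyGetD (colConcat w1 L) p 0)
            have h2 : (PySem.List.pyRange 0 L 1).map
                (fun p => PySem.List.pyGetD (colConcat w1 L) p 0) = colConcat w1 L := by
              have h2' := PySem.List.map_pyGetD_pyRange_zero' (colConcat w1 L) 0
              rwa [hlen1] at h2'
            rwa [h2] at h1
          have hoflc : PySem.Set.ofList ((colConcat w2 L).map
              (fun p => PySem.List.pyGetD (colConcat w1 L) p 0))
              = (colConcat w2 L).map (fun p => PySem.List.pyGetD (colConcat w1 L) p 0) :=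
            PySem.Set.ofList_eq_self_of_nodup _
              (hcperm.nodup_iff.mpr (colConcat_nodup w1 L hw1p))
          have hglast : ¬ (((PySem.Set.ofList ((colConcat w2 L).map
              (fun p => PySem.List.pyGetD (colConcat w1 L) p 0))).length : Int) ≠ L) := by
            rw [hoflc]
            push_neg
            rw [hcperm.length_eq]
            exact hlen1
          rw [hperm1, hperm2, if_neg hg1, if_neg hg2, hmapM, if_neg hBn]
          simp only [if_neg hglast]
          rw [hcomp]
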